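-- pv_equiv track=rewrite | github.com/neillkernohan/Theatre_Information | app.py | combine_events
-- ===== SOURCE A (Python) =====
-- def combine_events(events):
--     combined_events = []
--     i = 0
--     while i < len(events):
--         current_event = events[i]
--         if current_event['title'] == 'Booked All Day':
--             # Try to combine with following events
--             j = i + 1
--             while j < len(events):
--                 next_event = events[j]
--                 if next_event['title'] == 'Booked All Day' and current_event['end']  == next_event['start']:
--                     # Extend the current event's end date to the next event's end date
--                     current_event['end'] = next_event['end']
--                     j += 1
--                 else:
--                     break
--             i = j
--         else:
--             i += 1
--         combined_events.append(current_event)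
--     return combined_events
-- ===== SOURCE B (Python) =====
-- def combine_events(events):
--     combined = []
--     for event in events:
--         if (event['title'] == 'Booked All Day' and combined
--                 and combined[-1]['title'] == 'Booked All Day'
--                 and combined[-1]['end'] == event['start']):
--             combined[-1]['end'] = event['end']
--         else:
--             combined.append(event)
--     return combined
-- ===== Notes on version B (the rewrite author's own statement) =====
-- stated objective: simpler
-- what changed: Replaces the nested while-loops with index bookkeeping by a single flat for-loop that appends to the result and merges into its last element (combined[-1]) when the adjacency/title guard holds.
import Mathlib
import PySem

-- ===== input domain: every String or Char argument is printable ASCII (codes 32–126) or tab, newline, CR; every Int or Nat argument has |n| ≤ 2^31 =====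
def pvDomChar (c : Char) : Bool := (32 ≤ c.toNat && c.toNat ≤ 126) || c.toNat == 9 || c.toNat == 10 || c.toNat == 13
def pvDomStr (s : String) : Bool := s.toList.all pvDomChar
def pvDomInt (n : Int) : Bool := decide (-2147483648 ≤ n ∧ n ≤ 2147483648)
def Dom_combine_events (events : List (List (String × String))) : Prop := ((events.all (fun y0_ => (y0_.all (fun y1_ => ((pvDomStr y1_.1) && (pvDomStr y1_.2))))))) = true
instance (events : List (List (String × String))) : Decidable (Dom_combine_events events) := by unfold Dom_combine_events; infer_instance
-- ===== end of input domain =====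

-- B replaces A's nested while-loops (outer index i, inner scan j) by one flat loop that
-- merges into the tail of the output list; return-value equivalence only (both Pythons
-- mutate the merged event dicts' 'end' fields in place, in the same way).

-- event['k'] (value; Pre_ guarantees the key is present wherever Python reads it)
def pvGet (e : List (String × String)) (k : String) : String := (PySem.Dict.mk e).getD k ""
-- event['k'] = v
def pvSet (e : List (String × String)) (k v : String) : List (String × String) :=
  ((PySem.Dict.mk e).insert k v).items

-- ===== PORT A =====
-- the inner `while j < len(events)` loop: extends current_event's 'end' over mergeable
-- successors, returns (current_event, the remaining suffix events[j:])
def pvAbsorbA (cur : List (String × String)) :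
    List (List (String × String)) → (List (String × String)) × List (List (String × String))
  | [] => (cur, [])
  | n :: rest =>
    if pvGet n "title" == "Booked All Day" && pvGet cur "end" == pvGet n "start" then
      pvAbsorbA (pvSet cur "end" (pvGet n "end")) rest
    else (cur, n :: rest)

theorem pvAbsorbA_len : ∀ (l : List (List (String × String))) (cur : List (String × String)),
    (pvAbsorbA cur l).2.length ≤ l.length := by
  intro l
  induction l with
  | nil => intro cur; simp [pvAbsorbA]
  | cons n rest ih =>
    intro cur
    simp only [pvAbsorbA]
    split
    · exact Nat.le_trans (ih _) (Nat.le_succ _)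
    · simp

def combine_events (events : List (List (String × String))) : List (List (String × String)) :=
  match events with
  | [] => []
  | e :: rest =>
    if pvGet e "title" == "Booked All Day" then
      let p := pvAbsorbA e rest
      p.1 :: combine_events p.2
    else
      e :: combine_events rest
termination_by events.length
decreasing_by
  · exact Nat.lt_succ_of_le (pvAbsorbA_len rest e)
  · simp

-- ===== PORT B =====
-- the body of Source B's single `for event in events` loop
def pvStepB (combined : List (List (String × String))) (event : List (String × String)) :
    List (List (String × String)) :=
  if pvGet event "title" == "Booked All Day" then
    match combined.getLast? with
    | some last =>
      if pvGet last "title" == "Booked All Day" && pvGet last "end" == pvGet event "start" then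
        combined.dropLast ++ [pvSet last "end" (pvGet event "end")]
      else combined ++ [event]
    | none => combined ++ [event]
  else combined ++ [event]

def combine_events_alt (events : List (List (String × String))) : List (List (String × String)) :=
  events.foldl pvStepB []

-- ===== PRECONDITION & SPEC =====
-- Pre_ excludes (a) events with duplicate keys — a Lean-encoding artefact only, no Python dict
-- has them — and (b) events missing a key the Python reads (KeyError); it
-- slightly over-approximates the KeyError set by requiring
-- 'end' on the right event of an adjacent 'Booked All Day' pair, which A reads only
-- when the merge actually fires.
def Pre_combine_events (events : List (List (String × String))) : Prop :=
  (∀ e ∈ events, (e.map Prod.fst).Nodup ∧ "title" ∈ e.map Prod.fst) ∧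
  ∀ pq ∈ events.zip events.tail, pvGet pq.1 "title" = "Booked All Day" →
    pvGet pq.2 "title" = "Booked All Day" →
    "end" ∈ pq.1.map Prod.fst ∧ "start" ∈ pq.2.map Prod.fst ∧ "end" ∈ pq.2.map Prod.fst
instance (events : List (List (String × String))) : Decidable (Pre_combine_events events) := by
  unfold Pre_combine_events; infer_instance

def pvWitness_combine_events : (List (List (String × String))) :=
  [[("title", "Booked All Day"), ("start", "1"), ("end", "2")],
   [("title", "Booked All Day"), ("start", "2"), ("end", "3")],
   [("title", "Play"), ("start", "4"), ("end", "5")]]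

def Spec_combine_events (events : List (List (String × String))) (out : List (List (String × String))) : Prop := out = combine_events_alt events
instance (events : List (List (String × String))) (out : List (List (String × String))) : Decidable (Spec_combine_events events out) := by unfold Spec_combine_events; infer_instance

-- ===== CLAIM (what is proved, stated in full; the proofs are below) =====
def Claim_equal_combine_events : Prop := ∀ (events : List (List (String × String))), Dom_combine_events events → Pre_combine_events events → Spec_combine_events events (combine_events events)

-- ===== LEMMAS AND PROOFS =====

theorem pvGet_pvSet_title (e : List (String × String)) (v : String) :
    pvGet (pvSet e "end" v) "title" = pvGet e "title" := by
  simp only [pvGet, pvSet]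
  rw [show ({ items := ((PySem.Dict.mk e).insert "end" v).items } : PySem.Dict String String)
        = (PySem.Dict.mk e).insert "end" v from rfl, PySem.Dict.getD_insert]
  simp

theorem pvStepB_concat (acc : List (List (String × String))) (cur n : List (String × String))
    (hc : (pvGet n "title" == "Booked All Day" && pvGet cur "end" == pvGet n "start") = true) :
    pvStepB (acc ++ [cur]) n = acc ++ [pvSet cur "end" (pvGet n "end")] ∨
    pvGet cur "title" ≠ "Booked All Day" := by
  by_cases ht : pvGet cur "title" = "Booked All Day"
  · left
    simp only [Bool.and_eq_true, beq_iff_eq] at hc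
    simp [pvStepB, hc.1, hc.2, ht]
  · right; exact ht

-- fold over the inner-loop region: B's fold absorbs exactly what A's inner while absorbs
theorem foldB_absorb :
    ∀ (rest : List (List (String × String))) (acc : List (List (String × String)))
      (cur : List (String × String)), pvGet cur "title" = "Booked All Day" →
    rest.foldl pvStepB (acc ++ [cur]) =
      (pvAbsorbA cur rest).2.foldl pvStepB (acc ++ [(pvAbsorbA cur rest).1]) := by
  intro rest
  induction rest with
  | nil => intro acc cur _; simp [pvAbsorbA]
  | cons n rest ih =>
    intro acc cur htitle
    by_cases hc : (pvGet n "title" == "Booked All Day" && pvGet cur "end" == pvGet n "start") = true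
    · rcases pvStepB_concat acc cur n hc with h | h
      · simp only [List.foldl_cons, h, pvAbsorbA, hc, if_true]
        exact ih acc _ (by rw [pvGet_pvSet_title]; exact htitle)
      · exact absurd htitle h
    · rw [Bool.not_eq_true] at hc
      have he : pvAbsorbA cur (n :: rest) = (cur, n :: rest) := by simp [pvAbsorbA, hc]
      rw [he]

theorem pvAbsorbA_stop :
    ∀ (l : List (List (String × String))) (cur n : List (String × String))
      (t : List (List (String × String))), (pvAbsorbA cur l).2 = n :: t →
    (pvGet n "title" == "Booked All Day" &&
      pvGet (pvAbsorbA cur l).1 "end" == pvGet n "start") = false := by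
  intro l
  induction l with
  | nil => intro cur n t h; simp [pvAbsorbA] at h
  | cons m rest ih =>
    intro cur n t h
    simp only [pvAbsorbA] at h ⊢
    by_cases hc : (pvGet m "title" == "Booked All Day" && pvGet cur "end" == pvGet m "start") = true
    · simp only [hc, if_true] at h ⊢
      exact ih _ n t h
    · rw [Bool.not_eq_true] at hc
      rw [hc] at h ⊢
      simp only [Bool.false_eq_true, if_false] at h ⊢
      have h' : m :: rest = n :: t := h
      injection h' with h1 h2
      subst h1
      exact hc

-- the merge guard B checks against the tail of its output
def pvCond (last e : List (String × String)) : Bool :=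
  pvGet e "title" == "Booked All Day" && pvGet last "title" == "Booked All Day" &&
    pvGet last "end" == pvGet e "start"

theorem pvStepB_append (acc : List (List (String × String))) (e : List (String × String))
    (hinv : ∀ last, acc.getLast? = some last → pvCond last e = false) :
    pvStepB acc e = acc ++ [e] := by
  simp only [pvStepB]
  by_cases ht : pvGet e "title" = "Booked All Day"
  · simp only [ht, beq_self_eq_true, if_true]
    cases hl : acc.getLast? with
    | none => rfl
    | some last =>
      have := hinv last hl
      simp only [pvCond, ht, beq_self_eq_true, Bool.true_and] at this
      simp [this]
  · simp [ht]

theorem foldB_eq (l : List (List (String × String))) (acc : List (List (String × String)))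
    (hinv : ∀ last e t, acc.getLast? = some last → l = e :: t → pvCond last e = false) :
    l.foldl pvStepB acc = acc ++ combine_events l := by
  match l with
  | [] => simp [combine_events]
  | e :: rest =>
    have hstep : pvStepB acc e = acc ++ [e] :=
      pvStepB_append acc e (fun last hl => hinv last e rest hl rfl)
    by_cases ht : pvGet e "title" = "Booked All Day"
    · have hlen : (pvAbsorbA e rest).2.length < (e :: rest).length :=
        Nat.lt_succ_of_le (pvAbsorbA_len rest e)
      have hrec := foldB_eq (pvAbsorbA e rest).2 (acc ++ [(pvAbsorbA e rest).1])
        (by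
          intro last n t hl hrest
          rw [List.getLast?_concat] at hl
          obtain rfl := Option.some.injEq .. ▸ hl
          have := pvAbsorbA_stop rest e n t hrest
          simp only [pvCond, Bool.and_eq_false_iff] at this ⊢
          rcases this with h | h
          · left; left; exact h
          · right; exact h)
      calc (e :: rest).foldl pvStepB acc
          = rest.foldl pvStepB (acc ++ [e]) := by rw [List.foldl_cons, hstep]
        _ = (pvAbsorbA e rest).2.foldl pvStepB (acc ++ [(pvAbsorbA e rest).1]) :=
            foldB_absorb rest acc e ht
        _ = (acc ++ [(pvAbsorbA e rest).1]) ++ combine_events (pvAbsorbA e rest).2 := hrec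
        _ = acc ++ combine_events (e :: rest) := by
            rw [combine_events]
            simp [ht]
    · have hrec := foldB_eq rest (acc ++ [e])
        (by
          intro last n t hl hrest
          rw [List.getLast?_concat] at hl
          obtain rfl := Option.some.injEq .. ▸ hl
          simp only [pvCond]
          have : (pvGet e "title" == "Booked All Day") = false := by
            simp [ht]
          simp [this])
      rw [List.foldl_cons, hstep, hrec, combine_events]
      simp [ht]
termination_by l.length
decreasing_by
  · exact hlen
  · simp

-- ===== VERDICT (by name: the statement is the Claim_ definition above) =====
theorem combine_events_spec : Claim_equal_combine_events := by
  intro events _ _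
  unfold Spec_combine_events combine_events_alt
  have := foldB_eq events [] (by intro last e t hl _; simp at hl)
  rw [this]
  simp
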